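-- pv_equiv track=rewrite | github.com/ayyjohn/pb950oOzYABB2j8 | alternation.py | alternation
-- ===== SOURCE A (Python) =====
-- def alternation(array):
--     array.sort()
--     alternates = []
--     for i in range(len(array)):
--         if i % 2 == 0:
--             alternates.append(array[i])
--         else:
--             alternates.append(array[-i])
--     return alternates
-- ===== SOURCE B (Python) =====
-- def alternation(array):
--     array.sort()
--     front = array[::2]
--     back = array[-1::-2]
--     out = [x for pair in zip(front, back) for x in pair]
--     return out[:len(array)]
-- ===== Notes on version B (the rewrite author's own statement) =====
-- stated objective: alternative
-- what changed: Replaces A's per-index parity branch (indexing array[i] / array[-i] inside one loop over range(n)) with a slice-based decomposition: two strided slices of the sorted array are zipped, flattened, and truncated to n elements.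
import Mathlib
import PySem

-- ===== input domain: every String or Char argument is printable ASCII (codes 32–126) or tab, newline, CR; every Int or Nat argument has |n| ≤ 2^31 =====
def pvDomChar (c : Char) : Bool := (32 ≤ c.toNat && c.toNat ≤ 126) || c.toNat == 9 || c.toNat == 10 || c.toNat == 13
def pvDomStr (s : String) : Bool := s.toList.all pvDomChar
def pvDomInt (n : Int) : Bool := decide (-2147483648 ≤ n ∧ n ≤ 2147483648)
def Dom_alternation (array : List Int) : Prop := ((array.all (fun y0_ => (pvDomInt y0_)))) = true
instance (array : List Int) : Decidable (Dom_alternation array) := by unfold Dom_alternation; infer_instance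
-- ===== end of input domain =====

-- B replaces A's per-index parity branch with two strided slices of the sorted array, zipped,
-- flattened and truncated (alternative decomposition, same cost). Both Pythons sort the argument
-- in place; the equivalence proved here is about the return value.

-- ===== PORT A =====
-- every index A uses is in range, so pyGetD with default 0 computes exactly what Python's array[i] returns
def alternation (array : List Int) : List Int :=
  let arr := PySem.List.sorted array id
  (PySem.List.pyRange 0 (arr.length : Int) 1).foldl
    (fun acc i =>
      if i % 2 == 0 then acc ++ [PySem.List.pyGetD arr i 0]
      else acc ++ [PySem.List.pyGetD arr (-i) 0]) []

-- ===== PORT B =====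
-- front = arr[::2], back = arr[-1::-2] (Python slicing never raises, so .getD [] is exact);
-- the comprehension over zip is flatMap of the pairs; out[:len(arr)] is the final slice
def alternation_alt (array : List Int) : List Int :=
  let arr := PySem.List.sorted array id
  let front := (PySem.List.slice? arr none none 2).getD []
  let back := (PySem.List.slice? arr (some (-1)) none (-2)).getD []
  let out := (front.zip back).flatMap (fun p => [p.1, p.2])
  PySem.List.slice out none (some (arr.length : Int))

-- ===== PRECONDITION & SPEC =====
def Spec_alternation (array : List Int) (out : List Int) : Prop := out = alternation_alt array
instance (array : List Int) (out : List Int) : Decidable (Spec_alternation array out) := by unfold Spec_alternation; infer_instance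

-- ===== CLAIM (what is proved, stated in full; the proofs are below) =====
def Claim_equal_alternation : Prop := ∀ (array : List Int), Dom_alternation array → Spec_alternation array (alternation array)

-- ===== LEMMAS AND PROOFS =====

-- closed form of xs[::2]: element k is xs[2k], for k < ⌈len/2⌉
theorem pv_slice_front (xs : List Int) :
    PySem.List.slice? xs none none 2 =
      some ((List.range ((xs.length + 1) / 2)).map (fun k => xs.getD (2 * k) 0)) := by
  simp only [PySem.List.slice?, PySem.List.sliceIndices]
  norm_num
  have hc : (if 0 < xs.length then (((xs.length : Int) + 2 - 1) / 2).toNat else 0) = (xs.length + 1) / 2 := by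
    split <;> omega
  rw [hc, ← List.filterMap_eq_map]
  apply List.filterMap_congr
  intro k hk
  simp only [List.mem_range] at hk
  have h2 : 2 * k < xs.length := by omega
  have ht : (2 * (k : Int)).toNat = 2 * k := by omega
  simp [ht, List.getElem?_eq_getElem h2]

-- closed form of xs[-1::-2]: element k is xs[len - 1 - 2k], for k < ⌈len/2⌉
theorem pv_slice_back (xs : List Int) :
    PySem.List.slice? xs (some (-1)) none (-2) =
      some ((List.range ((xs.length + 1) / 2)).map (fun k => xs.getD (xs.length - 1 - 2 * k) 0)) := by
  simp only [PySem.List.slice?, PySem.List.sliceIndices]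
  norm_num
  have hc : (if 0 < xs.length then (((xs.length : Int) + 2 - 1) / 2).toNat else 0) = (xs.length + 1) / 2 := by
    split <;> omega
  rw [hc, ← List.filterMap_eq_map]
  apply List.filterMap_congr
  intro k hk
  simp only [List.mem_range] at hk
  have h2 : 2 * k < xs.length := by omega
  have ht : (-1 + (xs.length : Int) + -(2 * (k : Int))).toNat = xs.length - 1 - 2 * k := by omega
  have h3 : xs.length - 1 - 2 * k < xs.length := by omega
  simp [ht, List.getElem?_eq_getElem h3]

theorem pv_inter_len (u v : List Int) :
    ((u.zip v).flatMap (fun p => [p.1, p.2])).length = 2 * min u.length v.length := by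
  induction u generalizing v with
  | nil => simp
  | cons a u ih =>
    cases v with
    | nil => simp
    | cons b v => simp [ih]; omega

theorem pv_inter_getD (u v : List Int) (h : u.length = v.length) (j : Nat) :
    ((u.zip v).flatMap (fun p => [p.1, p.2])).getD j 0 =
      if j % 2 = 0 then u.getD (j / 2) 0 else v.getD (j / 2) 0 := by
  induction u generalizing v j with
  | nil =>
    have : v = [] := by cases v <;> simp_all
    subst this; simp
  | cons a u ih =>
    cases v with
    | nil => simp at h
    | cons b v =>
      match j with
      | 0 => simp
      | 1 => simp
      | (j+2) =>
        have h' : u.length = v.length := by simpa using h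
        have := ih v h' j
        simp only [List.zip_cons_cons, List.flatMap_cons, List.getD]
        simp only [List.getD] at this
        rw [show ([a,b] ++ (u.zip v).flatMap (fun p => [p.1,p.2]))[j+2]? = ((u.zip v).flatMap (fun p => [p.1,p.2]))[j]? from by simp]
        rw [this]
        have e1 : (j+2) % 2 = j % 2 := by omega
        have e2 : (j+2)/2 = j/2 + 1 := by omega
        rw [e1, e2]
        split <;> simp

theorem pv_main (array : List Int) : alternation array = alternation_alt array := by
  simp only [alternation, alternation_alt]
  set s := PySem.List.sorted array id with hs
  have hfun : (fun (acc : List Int) (i : Int) =>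
      if i % 2 == 0 then acc ++ [PySem.List.pyGetD s i 0]
      else acc ++ [PySem.List.pyGetD s (-i) 0]) =
      fun acc i => acc ++ [if i % 2 == 0 then PySem.List.pyGetD s i 0 else PySem.List.pyGetD s (-i) 0] := by
    funext acc i; split <;> rfl
  rw [hfun, PySem.List.foldl_append_singleton_eq_map, PySem.List.pyRange_one,
    pv_slice_front, pv_slice_back, Option.getD_some, Option.getD_some,
    PySem.List.slice_to_natCast]
  simp only [List.nil_append, Int.sub_zero, Int.toNat_natCast, List.map_map, zero_add]
  apply List.ext_getElem
  · simp only [List.length_map, List.length_range, List.length_take, pv_inter_len]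
    omega
  · intro i h1 h2
    simp only [List.length_map, List.length_range] at h1
    simp only [List.getElem_map, List.getElem_range, Function.comp_apply]
    rw [List.getElem_take]
    have hlen : i < ((((List.range ((s.length + 1) / 2)).map (fun k => s.getD (2 * k) 0)).zip
        ((List.range ((s.length + 1) / 2)).map (fun k => s.getD (s.length - 1 - 2 * k) 0))).flatMap
        (fun p => [p.1, p.2])).length := by
      simp only [pv_inter_len, List.length_map, List.length_range]
      omega
    rw [← List.getD_eq_getElem _ 0 hlen, pv_inter_getD _ _ (by simp) i]
    have hi2 : i / 2 < (s.length + 1) / 2 := by omega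
    simp only [List.getD_eq_getElem?_getD, List.getElem?_map, List.getElem?_range, hi2,
      Option.map_some, Option.getD_some]
    by_cases hp : i % 2 = 0
    · rw [if_pos hp, if_pos (show ((i:Int) % 2 == 0) = true by simp; omega),
        PySem.List.pyGetD_natCast, show 2 * (i/2) = i from by omega]
      exact List.getD_eq_getElem?_getD
    · rw [if_neg hp, if_neg (show ¬((i:Int) % 2 == 0) = true by simp; omega),
        PySem.List.pyGetD_neg_natCast s i 0 (by omega) (by omega),
        show s.length - 1 - 2*(i/2) = s.length - i from by omega]
      rw [List.getElem?_eq_getElem (show s.length - i < s.length by omega)]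
      rfl

-- ===== VERDICT (by name: the statement is the Claim_ definition above) =====
theorem alternation_spec : Claim_equal_alternation := by
  intro array _
  exact pv_main array
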